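-- pv_equiv track=rewrite | github.com/tulip-control/omega | omega/symbolic/enumeration.py | _enumerate_int
-- ===== SOURCE A (Python) =====
-- def _enumerate_int(bitvalues, j=0):
--     """Enumerate from a partial bitvector assignment.
--
--     @param bitvalues:
--         partial assignment to bits
--     @type bitvalues:
--         `list` of `str` or `None`
--     @param j:
--         index of current bit
--     """
--     n = len(bitvalues)
--     assert j < n, (j, n)
--     b = bitvalues[j]
--     # sign ?
--     if j == n - 1:
--         if b is None:
--             yield -2**j
--             yield 0
--         else:
--             b = int(b)
--             yield -b * 2**j
--         return
--     assert j < n - 1, (j, n)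
--     for v in _enumerate_int(bitvalues, j + 1):
--         if b is None:
--             yield v
--             yield v + 2**j
--         else:
--             b = int(b)
--             yield v + 2**j * b
-- ===== SOURCE B (Python) =====
-- def _enumerate_int(bitvalues, j=0):
--     """Enumerate from a partial bitvector assignment (iterative, high-to-low)."""
--     n = len(bitvalues)
--     assert j < n, (j, n)
--     b = bitvalues[n - 1]
--     if b is None:
--         results = [-2**(n - 1), 0]
--     else:
--         results = [-int(b) * 2**(n - 1)]
--     for i in reversed(range(j, n - 1)):
--         b = bitvalues[i]
--         if b is None:
--             results = [w for v in results for w in (v, v + 2**i)]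
--         else:
--             bi = int(b)
--             results = [v + 2**i * bi for v in results]
--     yield from results
-- ===== Notes on version B (the rewrite author's own statement) =====
-- stated objective: alternative
-- what changed: Replaces the generator recursion on the bit index by an iterative loop that seeds the partial-value list from the sign bit and widens it bit by bit from high to low, yielding the finished list.
-- outside the precondition, e.g. on _enumerate_int([None], -1): A returns [-1, -0.5, 0, 0.5], B returns [-1, -0.5, 0, 0.5]
import Mathlib
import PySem

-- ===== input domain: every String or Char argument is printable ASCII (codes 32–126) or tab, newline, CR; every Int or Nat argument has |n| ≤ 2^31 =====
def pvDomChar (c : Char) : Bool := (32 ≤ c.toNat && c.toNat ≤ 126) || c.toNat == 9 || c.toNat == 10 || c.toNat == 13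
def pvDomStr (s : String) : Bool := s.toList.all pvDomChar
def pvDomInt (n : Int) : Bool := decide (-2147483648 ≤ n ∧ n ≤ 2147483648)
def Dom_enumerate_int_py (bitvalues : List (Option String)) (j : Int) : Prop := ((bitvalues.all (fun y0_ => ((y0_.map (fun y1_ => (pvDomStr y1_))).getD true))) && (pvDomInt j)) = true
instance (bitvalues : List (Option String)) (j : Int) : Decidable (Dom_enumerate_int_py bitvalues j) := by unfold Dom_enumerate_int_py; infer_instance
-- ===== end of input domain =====

-- B replaces A's generator recursion by an iterative high-to-low loop over the bits; same values in the same order.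
-- Both versions are generators in Python; equivalence is about the produced sequence as a list.

-- ===== PORT A =====
-- Recursion of A on the bit index jn (as a Nat; negative j is outside Pre_): the generator's
-- yielded sequence becomes the returned list, 'for v in rec: yield …' becomes flatMap.
def enumAInt (bits : List (Option String)) (jn : Nat) : List Int :=
  let n := bits.length
  if h : jn < n then
    let b := bits[jn]
    if jn = n - 1 then
      match b with
      | none => [-(2:Int) ^ jn, 0]
      | some s => [-((PySem.Int.ofStr? s).getD 0) * (2:Int) ^ jn]
    else
      (enumAInt bits (jn + 1)).flatMap (fun v =>
        match b with
        | none => [v, v + (2:Int) ^ jn]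
        | some s => [v + (2:Int) ^ jn * ((PySem.Int.ofStr? s).getD 0)])
  else []
termination_by bits.length - jn

def enumerate_int_py (bitvalues : List (Option String)) (j : Int) : List Int :=
  if 0 ≤ j ∧ j < (bitvalues.length : Int) then enumAInt bitvalues j.toNat else []

-- ===== PORT B =====
-- one loop body of B: widen the partial-value list with bit i
def enumBStep (bits : List (Option String)) (results : List Int) (i : Int) : List Int :=
  match PySem.List.pyGet? bits i with
  | some none => results.flatMap (fun v => [v, v + (2:Int) ^ i.toNat])
  | some (some s) => results.map (fun v => v + (2:Int) ^ i.toNat * ((PySem.Int.ofStr? s).getD 0))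
  | none => results

def enumerate_int_py_alt (bitvalues : List (Option String)) (j : Int) : List Int :=
  let n : Int := bitvalues.length
  if 0 ≤ j ∧ j < n then
    let init : List Int :=
      match PySem.List.pyGet? bitvalues (n - 1) with
      | some none => [-(2:Int) ^ (bitvalues.length - 1), 0]
      | some (some s) => [-((PySem.Int.ofStr? s).getD 0) * (2:Int) ^ (bitvalues.length - 1)]
      | none => []
    ((PySem.List.pyRange j (n - 1) 1).reverse).foldl (enumBStep bitvalues) init
  else []

-- ===== PRECONDITION & SPEC =====
-- Pre_ excludes: j ≥ n (AssertionError), j < 0 (2**j is a float, so the result is not a list of ints —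
-- see the cited example), and a bit string at an index ≥ j that int() cannot parse (ValueError).
def Pre_enumerate_int_py (bitvalues : List (Option String)) (j : Int) : Prop :=
  0 ≤ j ∧ j < (bitvalues.length : Int) ∧
    ∀ o ∈ bitvalues.drop j.toNat, ∀ s, o = some s → (PySem.Int.ofStr? s).isSome = true
instance (bitvalues : List (Option String)) (j : Int) : Decidable (Pre_enumerate_int_py bitvalues j) := by
  unfold Pre_enumerate_int_py; infer_instance

def pvWitness_enumerate_int_py : List (Option String) × Int := ([some "1", none, some "0"], 0)

def Spec_enumerate_int_py (bitvalues : List (Option String)) (j : Int) (out : List Int) : Prop := out = enumerate_int_py_alt bitvalues j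
instance (bitvalues : List (Option String)) (j : Int) (out : List Int) : Decidable (Spec_enumerate_int_py bitvalues j out) := by unfold Spec_enumerate_int_py; infer_instance

-- ===== CLAIM (what is proved, stated in full; the proofs are below) =====
def Claim_equal_enumerate_int_py : Prop := ∀ (bitvalues : List (Option String)) (j : Int), Dom_enumerate_int_py bitvalues j → Pre_enumerate_int_py bitvalues j → Spec_enumerate_int_py bitvalues j (enumerate_int_py bitvalues j)

-- ===== LEMMAS AND PROOFS =====

-- B's loop, run from bit jn up, computes A's recursion at jn.
lemma enum_key (bits : List (Option String)) :
    ∀ (k jn : Nat), jn + k + 1 = bits.length →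
      enumAInt bits jn =
        ((PySem.List.pyRange (jn : Int) ((bits.length : Int) - 1) 1).reverse).foldl
          (enumBStep bits)
          (match PySem.List.pyGet? bits ((bits.length : Int) - 1) with
           | some none => [-(2:Int) ^ (bits.length - 1), 0]
           | some (some s) => [-((PySem.Int.ofStr? s).getD 0) * (2:Int) ^ (bits.length - 1)]
           | none => []) := by
  intro k
  induction k with
  | zero =>
    intro jn h
    have hj : jn = bits.length - 1 := by omega
    have hlt : jn < bits.length := by omega
    have hr : PySem.List.pyRange (jn : Int) ((bits.length : Int) - 1) 1 = [] :=
      PySem.List.pyRange_one_eq_nil (by omega)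
    rw [hr]
    simp only [List.reverse_nil, List.foldl_nil]
    rw [enumAInt]
    simp only [hj]
    have hcast : ((bits.length : Int) - 1) = ((bits.length - 1 : Nat) : Int) := by omega
    rw [hcast, PySem.List.pyGet?_natCast]
    have hget : bits[bits.length - 1]? = some (bits[bits.length - 1]'(by omega)) :=
      List.getElem?_eq_getElem (by omega)
    rw [hget]
    cases hb : bits[bits.length - 1]'(by omega) <;>
      simp [hb, show 0 < bits.length from by omega]
  | succ k ih =>
    intro jn h
    have hlt : jn < bits.length := by omega
    have hne : jn ≠ bits.length - 1 := by omega
    have hcons : PySem.List.pyRange (jn : Int) ((bits.length : Int) - 1) 1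
        = (jn : Int) :: PySem.List.pyRange ((jn : Int) + 1) ((bits.length : Int) - 1) 1 :=
      PySem.List.pyRange_one_cons (by omega)
    rw [enumAInt]
    simp only [hlt, dif_pos, if_neg hne]
    have hcast1 : ((jn : Int) + 1) = ((jn + 1 : Nat) : Int) := by push_cast; ring
    rw [hcons, List.reverse_cons, List.foldl_append, hcast1, ← ih (jn + 1) (by omega)]
    simp only [List.foldl_cons, List.foldl_nil]
    -- now show the flatMap body equals one enumBStep at index jn
    unfold enumBStep
    rw [PySem.List.pyGet?_natCast]
    have hget : bits[jn]? = some (bits[jn]'hlt) := List.getElem?_eq_getElem hlt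
    rw [hget]
    cases hb : bits[jn]'hlt with
    | none => simp
    | some s =>
      simp only [Int.toNat_natCast]
      exact Eq.symm List.map_eq_flatMap

-- ===== VERDICT (by name: the statement is the Claim_ definition above) =====
theorem enumerate_int_py_spec : Claim_equal_enumerate_int_py := by
  intro bits j _ hpre
  obtain ⟨h0, hlt, _⟩ := hpre
  unfold Spec_enumerate_int_py enumerate_int_py enumerate_int_py_alt
  simp only [if_pos (And.intro h0 hlt)]
  have hj : (j.toNat : Int) = j := Int.toNat_of_nonneg h0
  have hlen : j.toNat + (bits.length - 1 - j.toNat) + 1 = bits.length := by omega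
  have := enum_key bits (bits.length - 1 - j.toNat) j.toNat hlen
  rw [this, hj]
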